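-- pv_equiv track=rewrite | github.com/SirBroccoli/Advent-of-Code | Day 5/day 5.py | manualRules
-- ===== SOURCE A (Python) =====
-- def manualRules(puzzle):
--     '''
--     Identifies all of the rules each manual has to follow
--     determining the page order from the given puzzle
--     returns a dictionary containing the rules as key, and value as the page numbers
--     '''
--     rules = {}
--     for line in puzzle:
--         if '|' in line:
--             rule = line.split('|')
--             if rule[0] not in  rules:
--                 rules[rule[0]] = [rule[1]]
--             else:
--                 rules[rule[0]].append(rule[1])
--     return rules
-- ===== SOURCE B (Python) =====
-- def manualRules(puzzle):
--     '''Group-by reformulation: collect (left, right) pairs once, then build the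
--     dict by mapping each first-occurrence key to a per-key filter of the pairs.'''
--     pairs = [(r[0], r[1]) for r in (line.split('|') for line in puzzle if '|' in line)]
--     keys = dict.fromkeys(k for k, _ in pairs)
--     return {k: [v for k2, v in pairs if k2 == k] for k in keys}
-- ===== Notes on version B (the rewrite author's own statement) =====
-- stated objective: alternative
-- what changed: A builds the dict in one pass, mutating per-key lists as lines arrive; B first collects all (left,right) pairs, dedups the left keys in first-occurrence order, and builds each key's value list by a per-key filter over the pairs (a group-by decomposition).
import Mathlib
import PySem

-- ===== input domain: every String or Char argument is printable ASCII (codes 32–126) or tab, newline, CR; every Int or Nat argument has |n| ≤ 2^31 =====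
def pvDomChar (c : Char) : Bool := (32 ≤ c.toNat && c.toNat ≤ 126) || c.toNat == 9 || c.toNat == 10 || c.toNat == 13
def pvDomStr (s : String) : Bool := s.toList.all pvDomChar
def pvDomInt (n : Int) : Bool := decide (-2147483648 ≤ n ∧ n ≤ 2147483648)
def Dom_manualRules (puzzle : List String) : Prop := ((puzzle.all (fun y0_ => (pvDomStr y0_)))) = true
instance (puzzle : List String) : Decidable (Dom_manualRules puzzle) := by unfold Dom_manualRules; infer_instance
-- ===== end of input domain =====

-- B replaces A's single-pass dict mutation by a collect-pairs / dedup-keys / per-key-filter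
-- grouping (objective: alternative decomposition, same results, not claimed faster).

-- ===== PORT A =====
-- line.split('|') is PySem.Str.split?, some since "|" ≠ ""; rule[0]/rule[1] are
-- in range because '|' ∈ line guarantees at least two parts
def manualRules (puzzle : List String) : List (String × List String) :=
  (puzzle.foldl (fun rules line =>
      if PySem.Str.isIn "|" line then
        let rule := (PySem.Str.split? line "|").getD []
        let k := PySem.List.pyGetD rule 0 ""
        let v := PySem.List.pyGetD rule 1 ""
        if rules.contains k = false then rules.insert k [v]
        else rules.modify k [] (fun l => l ++ [v])
      else rules) PySem.Dict.empty).items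

-- ===== PORT B =====
-- B's per-line (r[0], r[1]) pair
def pvParse (line : String) : String × String :=
  let r := (PySem.Str.split? line "|").getD []
  (PySem.List.pyGetD r 0 "", PySem.List.pyGetD r 1 "")

def manualRules_alt (puzzle : List String) : List (String × List String) :=
  let pairs := (puzzle.filter (fun line => PySem.Str.isIn "|" line)).map pvParse
  let keys := PySem.List.dedup (pairs.map Prod.fst)
  keys.map (fun k => (k, (pairs.filter (fun p => p.1 == k)).map Prod.snd))

-- ===== PRECONDITION & SPEC =====
def Spec_manualRules (puzzle : List String) (out : List (String × List String)) : Prop := out = manualRules_alt puzzle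
instance (puzzle : List String) (out : List (String × List String)) : Decidable (Spec_manualRules puzzle out) := by unfold Spec_manualRules; infer_instance

-- ===== CLAIM (what is proved, stated in full; the proofs are below) =====
def Claim_equal_manualRules : Prop := ∀ (puzzle : List String), Dom_manualRules puzzle → Spec_manualRules puzzle (manualRules puzzle)

-- ===== LEMMAS AND PROOFS =====

-- A's insert/append branching is exactly Dict.modify
lemma step_eq_modify {κ : Type} [BEq κ] [LawfulBEq κ] (d : PySem.Dict κ (List String)) (k : κ) (v : String) :
    (if d.contains k = false then d.insert k [v] else d.modify k [] (fun l => l ++ [v]))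
      = d.modify k [] (fun l => l ++ [v]) := by
  by_cases h : d.contains k
  · simp [h]
  · have hf : List.find? (fun p => p.1 == k) d.items = none :=
      List.find?_eq_none.mpr (fun p hp hb => h (List.any_eq_true.mpr ⟨p, hp, hb⟩))
    have hg : d.getD k [] = [] := by
      simp [PySem.Dict.getD, PySem.Dict.get?, hf]
    simp [h, PySem.Dict.modify, hg]

-- a dict with nodup keys is its keys paired with their looked-up values
lemma items_eq_keys_map {κ ν : Type} [BEq κ] [LawfulBEq κ] (d : PySem.Dict κ ν) (dflt : ν)
    (h : d.keys.Nodup) : d.items = d.keys.map (fun k => (k, d.getD k dflt)) := by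
  obtain ⟨l⟩ := d
  induction l with
  | nil => rfl
  | cons p rest ih =>
    obtain ⟨k, v⟩ := p
    simp only [PySem.Dict.keys, List.map_cons, List.nodup_cons, List.mem_map] at h
    simp only [PySem.Dict.keys, List.map_cons, List.map_map]
    have hd : (PySem.Dict.mk ((k, v) :: rest) : PySem.Dict κ ν).getD k dflt = v := by
      simp [PySem.Dict.getD, PySem.Dict.get?_mk_cons]
    have ht : ∀ q ∈ rest, ((fun k' => (k', (PySem.Dict.mk ((k, v) :: rest) : PySem.Dict κ ν).getD k' dflt)) ∘ Prod.fst) q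
        = ((fun k' => (k', (PySem.Dict.mk rest : PySem.Dict κ ν).getD k' dflt)) ∘ Prod.fst) q := by
      intro q hq
      have hne : ¬ (k == q.1) = true := by
        intro hb
        exact h.1 ⟨q, hq, (eq_of_beq hb).symm⟩
      simp [Function.comp, PySem.Dict.getD, PySem.Dict.get?_mk_cons, hne]
    have ih' := ih h.2
    simp only [PySem.Dict.keys, List.map_map] at ih'
    rw [List.map_congr_left ht, ← ih']
    simp [hd]

-- ===== VERDICT (by name: the statement is the Claim_ definition above) =====
theorem manualRules_spec : Claim_equal_manualRules := by
  intro puzzle _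
  show manualRules puzzle = manualRules_alt puzzle
  unfold manualRules manualRules_alt
  -- rewrite A's loop into a fold of modify over the parsed pairs
  have h1 : (puzzle.foldl (fun rules line =>
      if PySem.Str.isIn "|" line then
        let rule := (PySem.Str.split? line "|").getD []
        let k := PySem.List.pyGetD rule 0 ""
        let v := PySem.List.pyGetD rule 1 ""
        if rules.contains k = false then rules.insert k [v]
        else rules.modify k [] (fun l => l ++ [v])
      else rules) PySem.Dict.empty)
      = ((puzzle.filter (fun line => PySem.Str.isIn "|" line)).map pvParse).foldl
          (fun d p => d.modify p.1 [] (fun l => l ++ [p.2])) PySem.Dict.empty := by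
    rw [List.foldl_map, ← PySem.List.foldl_if_eq_foldl_filter]
    refine PySem.List.foldl_congr_mem _ _ _ _ (fun d line _ => ?_)
    by_cases hm : PySem.Str.isIn "|" line = true
    · rw [if_pos hm, if_pos hm]
      exact step_eq_modify d (pvParse line).1 (pvParse line).2
    · rw [if_neg hm, if_neg hm]
  rw [h1]
  set pairs := (puzzle.filter (fun line => PySem.Str.isIn "|" line)).map pvParse with hp
  set d := pairs.foldl (fun d p => d.modify p.1 [] (fun l => l ++ [p.2])) PySem.Dict.empty with hd
  have hkeys : d.keys = PySem.List.dedup (pairs.map Prod.fst) := by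
    rw [hd, PySem.Dict.keys_foldl_modify_key pairs Prod.fst [] (fun _ p => fun l => l ++ [p.2])]
    simp [PySem.Dict.keys, PySem.Dict.empty, PySem.List.dedup_eq_ofList, PySem.Set.ofList_eq_foldl,
      PySem.Set.update]
  have hnd : d.keys.Nodup := by
    rw [hd]
    exact PySem.Dict.nodup_keys_foldl_modify_key pairs Prod.fst [] (fun _ p => fun l => l ++ [p.2])
      PySem.Dict.empty (by simp [PySem.Dict.keys, PySem.Dict.empty])
  have hget : ∀ k, d.getD k [] = (pairs.filter (fun p => p.1 == k)).map Prod.snd := by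
    intro k
    rw [hd, PySem.Dict.getD_foldl_modify_append pairs PySem.Dict.empty k]
    simp [PySem.Dict.getD, PySem.Dict.get?, PySem.Dict.empty]
  rw [items_eq_keys_map d [] hnd, hkeys]
  exact List.map_congr_left (fun k _ => by rw [hget k])
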